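-- pv_equiv track=rewrite | github.com/Gap6769/webnovel-managment | webnovel-manager-api/app/services/epub_service.py | clean_content_raw
-- ===== SOURCE A (Python) =====
-- def clean_content_raw(content: str) -> str:
--     """Limpia y formatea el contenido del capítulo."""
--     lines = content.split('\n')
--     cleaned_lines = []
--     current_paragraph = []
--
--     for line in lines:
--         line = line.strip()
--
--         if not line or line.replace('-', '').strip() == '':
--             if current_paragraph:
--                 cleaned_lines.append('<p>' + ' '.join(current_paragraph) + '</p>')
--                 current_paragraph = []
--             continue
--
--         if 'PDF:' in line or 'http' in line:
--             continue
--
--         current_paragraph.append(line)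
--
--     if current_paragraph:
--         cleaned_lines.append('<p>' + ' '.join(current_paragraph) + '</p>')
--
--     return '\n'.join(cleaned_lines)
-- ===== SOURCE B (Python) =====
-- def clean_content_raw(content: str) -> str:
--     """Filter-then-group: drop junk lines first, then emit each maximal run of
--     non-separator lines as one <p> paragraph (instead of a flush-on-separator accumulator)."""
--     def is_sep(l):
--         return l.replace('-', '').strip() == ''
--     kept = [l for l in map(str.strip, content.split('\n'))
--             if 'PDF:' not in l and 'http' not in l]
--     paragraphs = []
--     rest = kept
--     while rest:
--         if is_sep(rest[0]):
--             rest = rest[1:]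
--         else:
--             k = 1
--             while k < len(rest) and not is_sep(rest[k]):
--                 k += 1
--             paragraphs.append('<p>' + ' '.join(rest[:k]) + '</p>')
--             rest = rest[k:]
--     return '\n'.join(paragraphs)
-- ===== Notes on version B (the rewrite author's own statement) =====
-- stated objective: alternative
-- what changed: Replaces the flush-on-separator accumulator loop with a filter-then-group pass: junk (PDF:/http) lines are dropped first, then each maximal run of non-separator lines is emitted as one <p> paragraph by a two-level run scan.
import Mathlib
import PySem

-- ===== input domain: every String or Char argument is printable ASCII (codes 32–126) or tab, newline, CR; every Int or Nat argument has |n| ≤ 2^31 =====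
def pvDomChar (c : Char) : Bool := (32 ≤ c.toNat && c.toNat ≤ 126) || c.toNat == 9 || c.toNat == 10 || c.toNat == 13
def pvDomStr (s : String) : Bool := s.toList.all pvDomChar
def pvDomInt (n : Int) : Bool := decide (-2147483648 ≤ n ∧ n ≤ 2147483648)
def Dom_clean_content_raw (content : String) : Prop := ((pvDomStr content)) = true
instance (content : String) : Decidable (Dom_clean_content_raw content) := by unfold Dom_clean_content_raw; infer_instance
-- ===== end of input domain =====

-- B restructures A's accumulator loop as filter-junk-then-group-runs; same return value (alternative decomposition, no speed claim).

-- ===== PORT A =====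
-- A's flush-on-separator accumulator loop, transliterated over (cleaned_lines, current_paragraph).
def pvParaA (cur : List (List Char)) : List Char :=
  "<p>".toList ++ PySem.Chars.join [' '] cur ++ "</p>".toList

def cleanLoopA : List (List Char) → List (List Char) → List (List Char) → List (List Char)
  | [], out, cur => if cur = [] then out else out ++ [pvParaA cur]
  | l :: ls, out, cur =>
    let m := PySem.Chars.strip l
    if m = [] ∨ PySem.Chars.strip (PySem.Chars.replace m ['-'] []) = [] then
      cleanLoopA ls (if cur = [] then out else out ++ [pvParaA cur]) []
    else if PySem.Chars.isIn "PDF:".toList m || PySem.Chars.isIn "http".toList m then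
      cleanLoopA ls out cur
    else
      cleanLoopA ls out (cur ++ [m])

def clean_content_raw (content : String) : String :=
  String.ofList (PySem.Chars.join ['\n']
    (cleanLoopA (PySem.Chars.splitOn content.toList ['\n']) [] []))

-- ===== PORT B =====
def pvIsSep (l : List Char) : Bool :=
  PySem.Chars.strip (PySem.Chars.replace l ['-'] []) == []

def pvKeep (l : List Char) : Bool :=
  !PySem.Chars.isIn "PDF:".toList l && !PySem.Chars.isIn "http".toList l

def pvParaB (run : List (List Char)) : List Char :=
  "<p>".toList ++ PySem.Chars.join [' '] run ++ "</p>".toList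

-- B's run scan: skip separator lines, emit each maximal non-separator run as a paragraph.
def altRuns : List (List Char) → List (List Char)
  | [] => []
  | l :: rest =>
    if pvIsSep l then altRuns rest
    else pvParaB (l :: rest.takeWhile (fun x => !pvIsSep x)) ::
         altRuns (rest.dropWhile (fun x => !pvIsSep x))
termination_by xs => xs.length
decreasing_by
  · simp
  · have := List.length_dropWhile_le (fun x => !pvIsSep x) rest
    simp only [List.length_cons]; omega

def clean_content_raw_alt (content : String) : String :=
  String.ofList (PySem.Chars.join ['\n']
    (altRuns (((PySem.Chars.splitOn content.toList ['\n']).map PySem.Chars.strip).filter pvKeep)))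

-- ===== PRECONDITION & SPEC =====
def Spec_clean_content_raw (content : String) (out : String) : Prop := out = clean_content_raw_alt content
instance (content : String) (out : String) : Decidable (Spec_clean_content_raw content out) := by unfold Spec_clean_content_raw; infer_instance

-- ===== CLAIM (what is proved, stated in full; the proofs are below) =====
def Claim_equal_clean_content_raw : Prop := ∀ (content : String), Dom_clean_content_raw content → Spec_clean_content_raw content (clean_content_raw content)

-- ===== LEMMAS AND PROOFS =====

-- replace with old = "-" and new = "" is exactly filtering out '-'
theorem replace_go_filter (fuel : Nat) (l acc : List Char) (h : l.length ≤ fuel) :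
    PySem.Chars.replace.go ['-'] [] fuel l acc
      = acc.reverse ++ l.filter (fun c => !(c == '-')) := by
  induction fuel generalizing l acc with
  | zero =>
    have : l = [] := by cases l <;> simp_all
    subst this; simp [PySem.Chars.replace.go]
  | succ n ih =>
    cases l with
    | nil => simp [PySem.Chars.replace.go]
    | cons c t =>
      simp only [PySem.Chars.replace.go, List.isPrefixOf]
      by_cases hc : c = '-'
      · subst hc
        rw [if_pos (by decide)]
        rw [show (List.drop (['-'].length) ('-' :: t)) = t from rfl]
        rw [ih t (List.reverse [] ++ acc) (by simpa using Nat.le_of_succ_le_succ h)]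
        simp
      · rw [if_neg (by simp [Ne.symm hc])]
        rw [ih t (c :: acc) (by simpa using Nat.le_of_succ_le_succ h)]
        simp [hc]

theorem replace_dash (l : List Char) :
    PySem.Chars.replace l ['-'] [] = l.filter (fun c => !(c == '-')) := by
  simp [PySem.Chars.replace]
  rw [replace_go_filter l.length l [] le_rfl]; simp

-- if strip gives the empty string, every character was whitespace
theorem strip_eq_nil_all (x : List Char) (h : PySem.Chars.strip x = []) :
    ∀ c ∈ x, PySem.Chars.isspace c = true := by
  intro c hc
  unfold PySem.Chars.strip PySem.Chars.rstrip PySem.Chars.lstrip at h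
  have h1 : List.dropWhile PySem.Chars.isspace
      (List.dropWhile PySem.Chars.isspace x).reverse = [] := by
    simpa [List.reverse_eq_nil_iff] using h
  rw [List.dropWhile_eq_nil_iff] at h1
  have hx := List.takeWhile_append_dropWhile (p := PySem.Chars.isspace) (l := x)
  rw [← hx] at hc
  rcases List.mem_append.mp hc with h2 | h2
  · exact List.mem_takeWhile_imp h2
  · exact h1 c (List.mem_reverse.mpr h2)

-- a separator line (dashes/whitespace only) never contains "PDF:" or "http"
theorem sep_keep (l : List Char) (h : pvIsSep l = true) : pvKeep l = true := by
  unfold pvIsSep at h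
  rw [replace_dash] at h
  have hall := strip_eq_nil_all _ (by simpa using h)
  have key : ∀ c ∈ l, c ≠ '-' → PySem.Chars.isspace c = true := fun c hc hne =>
    hall c (List.mem_filter.mpr ⟨hc, by simp [hne]⟩)
  have h1 : PySem.Chars.isIn "PDF:".toList l = false := by
    cases hin : PySem.Chars.isIn "PDF:".toList l with
    | false => rfl
    | true =>
      have hinf : "PDF:".toList <:+: l := (PySem.Chars.isIn_iff_infix _ _).mp hin
      have hP : 'P' ∈ l := hinf.subset (by decide)
      have := key 'P' hP (by decide)
      exact absurd this (by decide)
  have h2 : PySem.Chars.isIn "http".toList l = false := by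
    cases hin : PySem.Chars.isIn "http".toList l with
    | false => rfl
    | true =>
      have hinf : "http".toList <:+: l := (PySem.Chars.isIn_iff_infix _ _).mp hin
      have hP : 'h' ∈ l := hinf.subset (by decide)
      have := key 'h' hP (by decide)
      exact absurd this (by decide)
  unfold pvKeep
  rw [h1, h2]
  rfl

-- A's inline separator test agrees with B's pvIsSep
theorem sepA_iff (m : List Char) :
    (m = [] ∨ PySem.Chars.strip (PySem.Chars.replace m ['-'] []) = []) ↔ pvIsSep m = true := by
  unfold pvIsSep
  constructor
  · rintro (rfl | h)
    · decide
    · simpa using h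
  · intro h
    right; simpa using h

-- bridge loop: B's runs with a pending paragraph
def runsP : List (List Char) → List (List Char) → List (List Char)
  | cur, [] => if cur = [] then [] else [pvParaA cur]
  | cur, k :: ks =>
    if pvIsSep k then (if cur = [] then [] else [pvParaA cur]) ++ runsP [] ks
    else runsP (cur ++ [k]) ks

theorem loopA_eq_runsP (ls : List (List Char)) (out cur : List (List Char)) :
    cleanLoopA ls out cur
      = out ++ runsP cur ((ls.map PySem.Chars.strip).filter pvKeep) := by
  induction ls generalizing out cur with
  | nil =>
    simp only [cleanLoopA, List.map_nil, List.filter_nil, runsP]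
    split_ifs <;> simp
  | cons l ls ih =>
    simp only [cleanLoopA, List.map_cons]
    by_cases hs : PySem.Chars.strip l = [] ∨
        PySem.Chars.strip (PySem.Chars.replace (PySem.Chars.strip l) ['-'] []) = []
    · rw [if_pos hs, ih]
      have hsep : pvIsSep (PySem.Chars.strip l) = true := (sepA_iff _).mp hs
      rw [List.filter_cons_of_pos (sep_keep _ hsep)]
      simp only [runsP, hsep, if_pos]
      split_ifs <;> simp
    · rw [if_neg hs]
      have hsep : pvIsSep (PySem.Chars.strip l) = false := by
        cases hx : pvIsSep (PySem.Chars.strip l) with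
        | false => rfl
        | true => exact absurd ((sepA_iff _).mpr hx) hs
      by_cases hj : (PySem.Chars.isIn "PDF:".toList (PySem.Chars.strip l)
          || PySem.Chars.isIn "http".toList (PySem.Chars.strip l)) = true
      · rw [if_pos hj, ih]
        have hk : pvKeep (PySem.Chars.strip l) = false := by
          unfold pvKeep
          rcases Bool.or_eq_true_iff.mp hj with h | h
          · rw [h]; rfl
          · rw [h]; simp
        rw [List.filter_cons_of_neg (by simp [hk])]
      · rw [if_neg hj, ih]
        have hk : pvKeep (PySem.Chars.strip l) = true := by
          unfold pvKeep
          have hj2 := Bool.or_eq_false_iff.mp (Bool.eq_false_iff.mpr hj)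
          rw [hj2.1, hj2.2]
          rfl
        rw [List.filter_cons_of_pos hk]
        simp only [runsP, hsep]
        simp

theorem runsP_cons_ne (ks : List (List Char)) (cur : List (List Char)) (h : cur ≠ []) :
    runsP cur ks
      = pvParaA (cur ++ ks.takeWhile (fun x => !pvIsSep x))
          :: runsP [] (ks.dropWhile (fun x => !pvIsSep x)) := by
  induction ks generalizing cur with
  | nil => simp [runsP, h]
  | cons k ks ih =>
    cases hk : pvIsSep k with
    | true =>
      simp only [runsP, hk, if_pos, List.takeWhile_cons, List.dropWhile_cons, Bool.not_true,
        Bool.false_eq_true, reduceIte]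
      simp [h]
    | false =>
      simp only [runsP, hk, Bool.false_eq_true, reduceIte, List.takeWhile_cons,
        List.dropWhile_cons, Bool.not_false, if_pos]
      rw [ih (cur ++ [k]) (by simp)]
      simp

theorem runsP_eq_altRuns_aux (n : Nat) : ∀ ks : List (List Char), ks.length ≤ n →
    runsP [] ks = altRuns ks := by
  induction n with
  | zero =>
    intro ks hks
    have : ks = [] := by cases ks <;> simp_all
    subst this; simp [runsP, altRuns]
  | succ n ih =>
    intro ks hks
    cases ks with
    | nil => simp [runsP, altRuns]
    | cons k ks =>
      rw [altRuns]
      cases hk : pvIsSep k with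
      | true =>
        simp only [runsP, hk, if_pos]
        simp only [List.nil_append]
        exact ih ks (by simpa using Nat.le_of_succ_le_succ hks)
      | false =>
        simp only [runsP, hk, Bool.false_eq_true, reduceIte, List.nil_append]
        rw [runsP_cons_ne ks [k] (by simp)]
        have hlen : (ks.dropWhile (fun x => !pvIsSep x)).length ≤ n := by
          have := List.length_dropWhile_le (fun x => !pvIsSep x) ks
          simp only [List.length_cons] at hks
          omega
        rw [ih _ hlen]
        simp [pvParaA, pvParaB]

theorem runsP_eq_altRuns (ks : List (List Char)) : runsP [] ks = altRuns ks :=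
  runsP_eq_altRuns_aux ks.length ks le_rfl

-- ===== VERDICT (by name: the statement is the Claim_ definition above) =====
theorem clean_content_raw_spec : Claim_equal_clean_content_raw := by
  intro content _
  unfold Spec_clean_content_raw clean_content_raw clean_content_raw_alt
  rw [loopA_eq_runsP, runsP_eq_altRuns]
  rfl
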